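-- pv_equiv track=rewrite | github.com/informateci/arnaldo | arnaldo/modules/linkini.py | check_SI
-- ===== SOURCE A (Python) =====
-- def check_SI(p):
--     mapping = [
--         (-24, ("y", "yocto")),
--         (-21, ("z", "zepto")),
--         (-18, ("a", "atto")),
--         (-15, ("f", "femto")),
--         (-12, ("p", "pico")),
--         (-9, ("n", "nano")),
--         (-6, ("u", "micro")),
--         (-3, ("m", "mili")),
--         (-2, ("c", "centi")),
--         (-1, ("d", "deci")),
--         (3, ("k", "kilo")),
--         (6, ("M", "mega")),
--         (9, ("G", "giga")),
--         (12, ("T", "tera")),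
--         (15, ("P", "peta")),
--         (18, ("E", "exa")),
--         (21, ("Z", "zetta")),
--         (24, ("Y", "yotta")),
--     ]
--
--     for check, value in mapping:
--         if p <= check:
--             return value
-- ===== SOURCE B (Python) =====
-- _THRESHOLDS = [-24, -21, -18, -15, -12, -9, -6, -3, -2, -1, 3, 6, 9, 12, 15, 18, 21, 24]
-- _VALUES = [
--     ("y", "yocto"), ("z", "zepto"), ("a", "atto"), ("f", "femto"),
--     ("p", "pico"), ("n", "nano"), ("u", "micro"), ("m", "mili"),
--     ("c", "centi"), ("d", "deci"), ("k", "kilo"), ("M", "mega"),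
--     ("G", "giga"), ("T", "tera"), ("P", "peta"), ("E", "exa"),
--     ("Z", "zetta"), ("Y", "yotta"),
-- ]
--
--
-- def check_SI(p):
--     # binary search for the first threshold >= p
--     lo, hi = 0, 18
--     while lo < hi:
--         mid = (lo + hi) // 2
--         if _THRESHOLDS[mid] < p:
--             lo = mid + 1
--         else:
--             hi = mid
--     return _VALUES[lo] if lo < 18 else None
-- ===== Notes on version B (the rewrite author's own statement) =====
-- stated objective: alternative
-- what changed: Replaced the linear scan over the (threshold, value) list with a binary search (bisect_left style) into a sorted threshold table and a parallel value table.
import Mathlib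
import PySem

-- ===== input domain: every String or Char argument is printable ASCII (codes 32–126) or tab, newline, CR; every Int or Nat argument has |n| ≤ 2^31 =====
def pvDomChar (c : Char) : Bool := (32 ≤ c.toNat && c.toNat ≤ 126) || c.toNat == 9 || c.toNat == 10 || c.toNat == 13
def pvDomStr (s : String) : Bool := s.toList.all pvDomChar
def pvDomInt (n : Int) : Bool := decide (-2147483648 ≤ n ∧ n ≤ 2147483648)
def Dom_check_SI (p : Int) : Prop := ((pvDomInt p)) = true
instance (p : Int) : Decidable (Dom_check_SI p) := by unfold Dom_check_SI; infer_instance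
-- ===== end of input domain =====

-- B replaces A's linear scan of the (threshold, value) table by a binary search into a
-- sorted threshold table with a parallel value table (alternative algorithm, same outputs).

-- ===== PORT A =====
-- the `for check, value in mapping: if p <= check: return value` loop, step for step
def loopA (p : Int) : List (Int × (String × String)) → Option (String × String)
  | [] => none
  | (check, value) :: rest => if p ≤ check then some value else loopA p rest

def check_SI (p : Int) : Option (String × String) :=
  loopA p [
    (-24, ("y", "yocto")),
    (-21, ("z", "zepto")),
    (-18, ("a", "atto")),
    (-15, ("f", "femto")),
    (-12, ("p", "pico")),
    (-9, ("n", "nano")),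
    (-6, ("u", "micro")),
    (-3, ("m", "mili")),
    (-2, ("c", "centi")),
    (-1, ("d", "deci")),
    (3, ("k", "kilo")),
    (6, ("M", "mega")),
    (9, ("G", "giga")),
    (12, ("T", "tera")),
    (15, ("P", "peta")),
    (18, ("E", "exa")),
    (21, ("Z", "zetta")),
    (24, ("Y", "yotta"))
  ]

-- ===== PORT B =====
def pvThresholds : List Int := [-24, -21, -18, -15, -12, -9, -6, -3, -2, -1, 3, 6, 9, 12, 15, 18, 21, 24]

def pvValues : List (String × String) := [
    ("y", "yocto"),
    ("z", "zepto"),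
    ("a", "atto"),
    ("f", "femto"),
    ("p", "pico"),
    ("n", "nano"),
    ("u", "micro"),
    ("m", "mili"),
    ("c", "centi"),
    ("d", "deci"),
    ("k", "kilo"),
    ("M", "mega"),
    ("G", "giga"),
    ("T", "tera"),
    ("P", "peta"),
    ("E", "exa"),
    ("Z", "zetta"),
    ("Y", "yotta")
  ]

-- the hand-written `while lo < hi` binary-search loop of Source B
def pvBisect (p : Int) (lo hi : Nat) : Nat :=
  if h : lo < hi then
    let mid := (lo + hi) / 2
    if pvThresholds.getD mid 0 < p then pvBisect p (mid + 1) hi else pvBisect p lo mid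
  else lo
termination_by hi - lo
decreasing_by all_goals omega

def check_SI_alt (p : Int) : Option (String × String) :=
  if pvBisect p 0 18 < 18 then pvValues[pvBisect p 0 18]? else none

-- ===== PRECONDITION & SPEC =====
def Spec_check_SI (p : Int) (out : Option (String × String)) : Prop := out = check_SI_alt p
instance (p : Int) (out : Option (String × String)) : Decidable (Spec_check_SI p out) := by unfold Spec_check_SI; infer_instance

-- ===== CLAIM (what is proved, stated in full; the proofs are below) =====
def Claim_equal_check_SI : Prop := ∀ (p : Int), Dom_check_SI p → Spec_check_SI p (check_SI p)

-- ===== LEMMAS AND PROOFS =====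

-- the binary-search loop lands exactly on the split point k of p in pvThresholds
theorem pvBisect_eq (p : Int) (k lo hi : Nat) (hlo : lo ≤ k) (hk : k ≤ hi) (hhi : hi ≤ 18)
    (hlow : ∀ j, j < k → pvThresholds.getD j 0 < p)
    (hhigh : ∀ j, k ≤ j → j < 18 → p ≤ pvThresholds.getD j 0) :
    pvBisect p lo hi = k := by
  fun_induction pvBisect p lo hi with
  | case1 lo hi h mid hlt ih =>
      refine ih ?_ hk hhi
      by_contra hc
      have := hhigh mid (by omega) (by omega)
      omega
  | case2 lo hi h mid hlt ih =>
      refine ih hlo ?_ (by omega)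
      by_contra hc
      have := hlow mid (by omega)
      omega
  | case3 lo hi h => omega

-- ===== VERDICT (by name: the statement is the Claim_ definition above) =====
set_option maxHeartbeats 1000000 in
theorem check_SI_spec : Claim_equal_check_SI := by
  intro p _
  unfold Spec_check_SI
  by_cases h0 : p ≤ (-24 : Int)
  · have hb : pvBisect p 0 18 = 0 := by
      apply pvBisect_eq p 0 0 18 (by omega) (by omega) (by omega)
      · intro j hj; interval_cases j <;> simp [pvThresholds] <;> omega
      · intro j hj1 hj2; interval_cases j <;> simp [pvThresholds] <;> omega
    have ha : check_SI_alt p = some ("y", "yocto") := by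
      unfold check_SI_alt; rw [hb]; norm_num [pvValues]
    rw [ha]
    unfold check_SI
    repeat (unfold loopA; split_ifs <;> try omega)
    all_goals rfl
  by_cases h1 : p ≤ (-21 : Int)
  · have hb : pvBisect p 0 18 = 1 := by
      apply pvBisect_eq p 1 0 18 (by omega) (by omega) (by omega)
      · intro j hj; interval_cases j <;> simp [pvThresholds] <;> omega
      · intro j hj1 hj2; interval_cases j <;> simp [pvThresholds] <;> omega
    have ha : check_SI_alt p = some ("z", "zepto") := by
      unfold check_SI_alt; rw [hb]; norm_num [pvValues]
    rw [ha]
    unfold check_SI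
    repeat (unfold loopA; split_ifs <;> try omega)
    all_goals rfl
  by_cases h2 : p ≤ (-18 : Int)
  · have hb : pvBisect p 0 18 = 2 := by
      apply pvBisect_eq p 2 0 18 (by omega) (by omega) (by omega)
      · intro j hj; interval_cases j <;> simp [pvThresholds] <;> omega
      · intro j hj1 hj2; interval_cases j <;> simp [pvThresholds] <;> omega
    have ha : check_SI_alt p = some ("a", "atto") := by
      unfold check_SI_alt; rw [hb]; norm_num [pvValues]
    rw [ha]
    unfold check_SI
    repeat (unfold loopA; split_ifs <;> try omega)
    all_goals rfl
  by_cases h3 : p ≤ (-15 : Int)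
  · have hb : pvBisect p 0 18 = 3 := by
      apply pvBisect_eq p 3 0 18 (by omega) (by omega) (by omega)
      · intro j hj; interval_cases j <;> simp [pvThresholds] <;> omega
      · intro j hj1 hj2; interval_cases j <;> simp [pvThresholds] <;> omega
    have ha : check_SI_alt p = some ("f", "femto") := by
      unfold check_SI_alt; rw [hb]; norm_num [pvValues]
    rw [ha]
    unfold check_SI
    repeat (unfold loopA; split_ifs <;> try omega)
    all_goals rfl
  by_cases h4 : p ≤ (-12 : Int)
  · have hb : pvBisect p 0 18 = 4 := by
      apply pvBisect_eq p 4 0 18 (by omega) (by omega) (by omega)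
      · intro j hj; interval_cases j <;> simp [pvThresholds] <;> omega
      · intro j hj1 hj2; interval_cases j <;> simp [pvThresholds] <;> omega
    have ha : check_SI_alt p = some ("p", "pico") := by
      unfold check_SI_alt; rw [hb]; norm_num [pvValues]
    rw [ha]
    unfold check_SI
    repeat (unfold loopA; split_ifs <;> try omega)
    all_goals rfl
  by_cases h5 : p ≤ (-9 : Int)
  · have hb : pvBisect p 0 18 = 5 := by
      apply pvBisect_eq p 5 0 18 (by omega) (by omega) (by omega)
      · intro j hj; interval_cases j <;> simp [pvThresholds] <;> omega
      · intro j hj1 hj2; interval_cases j <;> simp [pvThresholds] <;> omega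
    have ha : check_SI_alt p = some ("n", "nano") := by
      unfold check_SI_alt; rw [hb]; norm_num [pvValues]
    rw [ha]
    unfold check_SI
    repeat (unfold loopA; split_ifs <;> try omega)
    all_goals rfl
  by_cases h6 : p ≤ (-6 : Int)
  · have hb : pvBisect p 0 18 = 6 := by
      apply pvBisect_eq p 6 0 18 (by omega) (by omega) (by omega)
      · intro j hj; interval_cases j <;> simp [pvThresholds] <;> omega
      · intro j hj1 hj2; interval_cases j <;> simp [pvThresholds] <;> omega
    have ha : check_SI_alt p = some ("u", "micro") := by
      unfold check_SI_alt; rw [hb]; norm_num [pvValues]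
    rw [ha]
    unfold check_SI
    repeat (unfold loopA; split_ifs <;> try omega)
    all_goals rfl
  by_cases h7 : p ≤ (-3 : Int)
  · have hb : pvBisect p 0 18 = 7 := by
      apply pvBisect_eq p 7 0 18 (by omega) (by omega) (by omega)
      · intro j hj; interval_cases j <;> simp [pvThresholds] <;> omega
      · intro j hj1 hj2; interval_cases j <;> simp [pvThresholds] <;> omega
    have ha : check_SI_alt p = some ("m", "mili") := by
      unfold check_SI_alt; rw [hb]; norm_num [pvValues]
    rw [ha]
    unfold check_SI
    repeat (unfold loopA; split_ifs <;> try omega)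
    all_goals rfl
  by_cases h8 : p ≤ (-2 : Int)
  · have hb : pvBisect p 0 18 = 8 := by
      apply pvBisect_eq p 8 0 18 (by omega) (by omega) (by omega)
      · intro j hj; interval_cases j <;> simp [pvThresholds] <;> omega
      · intro j hj1 hj2; interval_cases j <;> simp [pvThresholds] <;> omega
    have ha : check_SI_alt p = some ("c", "centi") := by
      unfold check_SI_alt; rw [hb]; norm_num [pvValues]
    rw [ha]
    unfold check_SI
    repeat (unfold loopA; split_ifs <;> try omega)
    all_goals rfl
  by_cases h9 : p ≤ (-1 : Int)
  · have hb : pvBisect p 0 18 = 9 := by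
      apply pvBisect_eq p 9 0 18 (by omega) (by omega) (by omega)
      · intro j hj; interval_cases j <;> simp [pvThresholds] <;> omega
      · intro j hj1 hj2; interval_cases j <;> simp [pvThresholds] <;> omega
    have ha : check_SI_alt p = some ("d", "deci") := by
      unfold check_SI_alt; rw [hb]; norm_num [pvValues]
    rw [ha]
    unfold check_SI
    repeat (unfold loopA; split_ifs <;> try omega)
    all_goals rfl
  by_cases h10 : p ≤ (3 : Int)
  · have hb : pvBisect p 0 18 = 10 := by
      apply pvBisect_eq p 10 0 18 (by omega) (by omega) (by omega)
      · intro j hj; interval_cases j <;> simp [pvThresholds] <;> omega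
      · intro j hj1 hj2; interval_cases j <;> simp [pvThresholds] <;> omega
    have ha : check_SI_alt p = some ("k", "kilo") := by
      unfold check_SI_alt; rw [hb]; norm_num [pvValues]
    rw [ha]
    unfold check_SI
    repeat (unfold loopA; split_ifs <;> try omega)
    all_goals rfl
  by_cases h11 : p ≤ (6 : Int)
  · have hb : pvBisect p 0 18 = 11 := by
      apply pvBisect_eq p 11 0 18 (by omega) (by omega) (by omega)
      · intro j hj; interval_cases j <;> simp [pvThresholds] <;> omega
      · intro j hj1 hj2; interval_cases j <;> simp [pvThresholds] <;> omega
    have ha : check_SI_alt p = some ("M", "mega") := by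
      unfold check_SI_alt; rw [hb]; norm_num [pvValues]
    rw [ha]
    unfold check_SI
    repeat (unfold loopA; split_ifs <;> try omega)
    all_goals rfl
  by_cases h12 : p ≤ (9 : Int)
  · have hb : pvBisect p 0 18 = 12 := by
      apply pvBisect_eq p 12 0 18 (by omega) (by omega) (by omega)
      · intro j hj; interval_cases j <;> simp [pvThresholds] <;> omega
      · intro j hj1 hj2; interval_cases j <;> simp [pvThresholds] <;> omega
    have ha : check_SI_alt p = some ("G", "giga") := by
      unfold check_SI_alt; rw [hb]; norm_num [pvValues]
    rw [ha]
    unfold check_SI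
    repeat (unfold loopA; split_ifs <;> try omega)
    all_goals rfl
  by_cases h13 : p ≤ (12 : Int)
  · have hb : pvBisect p 0 18 = 13 := by
      apply pvBisect_eq p 13 0 18 (by omega) (by omega) (by omega)
      · intro j hj; interval_cases j <;> simp [pvThresholds] <;> omega
      · intro j hj1 hj2; interval_cases j <;> simp [pvThresholds] <;> omega
    have ha : check_SI_alt p = some ("T", "tera") := by
      unfold check_SI_alt; rw [hb]; norm_num [pvValues]
    rw [ha]
    unfold check_SI
    repeat (unfold loopA; split_ifs <;> try omega)
    all_goals rfl
  by_cases h14 : p ≤ (15 : Int)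
  · have hb : pvBisect p 0 18 = 14 := by
      apply pvBisect_eq p 14 0 18 (by omega) (by omega) (by omega)
      · intro j hj; interval_cases j <;> simp [pvThresholds] <;> omega
      · intro j hj1 hj2; interval_cases j <;> simp [pvThresholds] <;> omega
    have ha : check_SI_alt p = some ("P", "peta") := by
      unfold check_SI_alt; rw [hb]; norm_num [pvValues]
    rw [ha]
    unfold check_SI
    repeat (unfold loopA; split_ifs <;> try omega)
    all_goals rfl
  by_cases h15 : p ≤ (18 : Int)
  · have hb : pvBisect p 0 18 = 15 := by
      apply pvBisect_eq p 15 0 18 (by omega) (by omega) (by omega)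
      · intro j hj; interval_cases j <;> simp [pvThresholds] <;> omega
      · intro j hj1 hj2; interval_cases j <;> simp [pvThresholds] <;> omega
    have ha : check_SI_alt p = some ("E", "exa") := by
      unfold check_SI_alt; rw [hb]; norm_num [pvValues]
    rw [ha]
    unfold check_SI
    repeat (unfold loopA; split_ifs <;> try omega)
    all_goals rfl
  by_cases h16 : p ≤ (21 : Int)
  · have hb : pvBisect p 0 18 = 16 := by
      apply pvBisect_eq p 16 0 18 (by omega) (by omega) (by omega)
      · intro j hj; interval_cases j <;> simp [pvThresholds] <;> omega
      · intro j hj1 hj2; interval_cases j <;> simp [pvThresholds] <;> omega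
    have ha : check_SI_alt p = some ("Z", "zetta") := by
      unfold check_SI_alt; rw [hb]; norm_num [pvValues]
    rw [ha]
    unfold check_SI
    repeat (unfold loopA; split_ifs <;> try omega)
    all_goals rfl
  by_cases h17 : p ≤ (24 : Int)
  · have hb : pvBisect p 0 18 = 17 := by
      apply pvBisect_eq p 17 0 18 (by omega) (by omega) (by omega)
      · intro j hj; interval_cases j <;> simp [pvThresholds] <;> omega
      · intro j hj1 hj2; interval_cases j <;> simp [pvThresholds] <;> omega
    have ha : check_SI_alt p = some ("Y", "yotta") := by
      unfold check_SI_alt; rw [hb]; norm_num [pvValues]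
    rw [ha]
    unfold check_SI
    repeat (unfold loopA; split_ifs <;> try omega)
    all_goals rfl
  have hb : pvBisect p 0 18 = 18 := by
    apply pvBisect_eq p 18 0 18 (by omega) (by omega) (by omega)
    · intro j hj; interval_cases j <;> simp [pvThresholds] <;> omega
    · intro j hj1 hj2; omega
  have ha : check_SI_alt p = none := by
    unfold check_SI_alt; rw [hb]; norm_num
  rw [ha]
  unfold check_SI
  repeat (unfold loopA; split_ifs <;> try omega)
  all_goals rfl
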